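-- pv_equiv track=rewrite | github.com/mhhassaan/pcforge | pc-forge-api/app/services/ai_service.py | select_best_within_budget
-- ===== SOURCE A (Python) =====
-- def select_best_within_budget(items, budget_limit, price_key="price_pkr", id_key="product_id"):
--     """
--     Helper to safely select the best item within budget or the cheapest if none fit.
--     """
--     if not items:
--         return None
--
--     # Filter items that have a price
--     valid_items = [item for item in items if item.get(price_key) is not None]
--     if not valid_items:
--         return None
--
--     # Try to find items within budget
--     in_budget = [item for item in valid_items if item[price_key] <= budget_limit]
--
--     if in_budget:
--         # Sort by price descending to get the 'best' (most expensive) within this bracket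
--         return sorted(in_budget, key=lambda x: x[price_key], reverse=True)[0]
--     else:
--         # Fallback: Cheapest available
--         return sorted(valid_items, key=lambda x: x[price_key])[0]
-- ===== SOURCE B (Python) =====
-- def select_best_within_budget(items, budget_limit, price_key="price_pkr", id_key="product_id"):
--     best = None      # (price, item): priciest item with price <= budget_limit, first occurrence wins ties
--     cheapest = None  # (price, item): cheapest priced item overall, first occurrence wins ties
--     for item in items:
--         p = item.get(price_key)
--         if p is None:
--             continue
--         if p <= budget_limit and (best is None or p > best[0]):
--             best = (p, item)
--         if cheapest is None or p < cheapest[0]: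
--             cheapest = (p, item)
--     if best is not None:
--         return best[1]
--     if cheapest is not None:
--         return cheapest[1]
--     return None
-- ===== Notes on version B (the rewrite author's own statement) =====
-- stated objective: simpler
-- what changed: Replaces the two filter-comprehensions plus two full sorts with a single pass keeping two running extrema (best in-budget item and cheapest item), with strict comparisons so the first occurrence wins ties exactly as the stable sorts do.
import Mathlib
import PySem

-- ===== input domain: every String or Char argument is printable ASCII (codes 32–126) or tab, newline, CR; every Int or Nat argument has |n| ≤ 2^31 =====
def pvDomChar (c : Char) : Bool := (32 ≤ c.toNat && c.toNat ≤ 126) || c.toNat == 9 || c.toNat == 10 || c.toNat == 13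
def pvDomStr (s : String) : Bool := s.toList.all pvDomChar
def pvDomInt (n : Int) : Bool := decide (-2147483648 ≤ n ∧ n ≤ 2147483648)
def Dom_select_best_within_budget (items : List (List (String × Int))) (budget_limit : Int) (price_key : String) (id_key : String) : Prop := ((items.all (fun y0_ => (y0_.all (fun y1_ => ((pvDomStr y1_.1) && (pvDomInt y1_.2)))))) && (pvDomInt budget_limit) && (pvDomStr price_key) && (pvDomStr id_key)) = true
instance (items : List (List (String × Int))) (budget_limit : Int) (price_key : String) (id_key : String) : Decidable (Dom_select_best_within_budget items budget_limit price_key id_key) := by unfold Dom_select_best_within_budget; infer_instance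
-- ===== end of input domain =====

-- B replaces A's two filter-comprehensions plus two stable sorts by one pass keeping two
-- running extrema (strict comparisons so the first occurrence wins ties): objective = simpler.

-- ===== PORT A =====
-- item[price_key] is ported as get?.getD 0: inside `valid` the key is always present, so this is exact.
def select_best_within_budget (items : List (List (String × Int))) (budget_limit : Int) (price_key : String) (id_key : String) : Option (List (String × Int)) :=
  if items = [] then none
  else
    -- valid = items with a price; in_budget = valid items with price <= budget_limit (written inline)
    if items.filter (fun item => ((PySem.Dict.mk item).get? price_key).isSome) = [] then none
    else
      if (items.filter (fun item => ((PySem.Dict.mk item).get? price_key).isSome)).filter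
           (fun item => decide (((PySem.Dict.mk item).get? price_key).getD 0 ≤ budget_limit)) ≠ [] then
        (PySem.List.sorted
          ((items.filter (fun item => ((PySem.Dict.mk item).get? price_key).isSome)).filter
            (fun item => decide (((PySem.Dict.mk item).get? price_key).getD 0 ≤ budget_limit)))
          (fun item => ((PySem.Dict.mk item).get? price_key).getD 0) true).head?
      else
        (PySem.List.sorted (items.filter (fun item => ((PySem.Dict.mk item).get? price_key).isSome))
          (fun item => ((PySem.Dict.mk item).get? price_key).getD 0) false).head?

-- ===== PORT B =====
def select_best_within_budget_alt (items : List (List (String × Int))) (budget_limit : Int) (price_key : String) (id_key : String) : Option (List (String × Int)) :=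
  let s := items.foldl
    (fun (s : Option (Int × List (String × Int)) × Option (Int × List (String × Int))) item =>
      match (PySem.Dict.mk item).get? price_key with
      | none => s
      | some p =>
        let best := if decide (p ≤ budget_limit) && (match s.1 with | none => true | some b => decide (b.1 < p)) then some (p, item) else s.1
        let cheapest := if (match s.2 with | none => true | some c => decide (p < c.1)) then some (p, item) else s.2
        (best, cheapest))
    (none, none)
  match s.1 with
  | some b => some b.2
  | none =>
    match s.2 with
    | some c => some c.2
    | none => none

-- ===== PRECONDITION & SPEC =====
def Spec_select_best_within_budget (items : List (List (String × Int))) (budget_limit : Int) (price_key : String) (id_key : String) (out : Option (List (String × Int))) : Prop := out = select_best_within_budget_alt items budget_limit price_key id_key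
instance (items : List (List (String × Int))) (budget_limit : Int) (price_key : String) (id_key : String) (out : Option (List (String × Int))) : Decidable (Spec_select_best_within_budget items budget_limit price_key id_key out) := by unfold Spec_select_best_within_budget; infer_instance

-- ===== CLAIM (what is proved, stated in full; the proofs are below) =====
def Claim_equal_select_best_within_budget : Prop := ∀ (items : List (List (String × Int))) (budget_limit : Int) (price_key : String) (id_key : String), Dom_select_best_within_budget items budget_limit price_key id_key → Spec_select_best_within_budget items budget_limit price_key id_key (select_best_within_budget items budget_limit price_key id_key)

-- ===== LEMMAS AND PROOFS =====

-- the max?/min? fold steps, named so the sorted-head lemmas can be stated cleanly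
def pvMaxStep {α : Type} (key : α → Int) (o : Option α) (x : α) : Option α :=
  match o with | none => some x | some m => if key m < key x then some x else some m

def pvMinStep {α : Type} (key : α → Int) (o : Option α) (x : α) : Option α :=
  match o with | none => some x | some m => if key x < key m then some x else some m

theorem head_insertBy_rev {α : Type} (key : α → Int) (x : α) (l : List α) :
    (PySem.List.insertBy (fun a b => decide (key b < key a)) x l).head? = pvMaxStep key l.head? x := by
  cases l with
  | nil => simp [PySem.List.insertBy, pvMaxStep]
  | cons y ys =>
    simp only [PySem.List.insertBy, pvMaxStep, List.head?]
    split_ifs with h <;> simp_all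

theorem head_insertBy_asc {α : Type} (key : α → Int) (x : α) (l : List α) :
    (PySem.List.insertBy (fun a b => decide (key a < key b)) x l).head? = pvMinStep key l.head? x := by
  cases l with
  | nil => simp [PySem.List.insertBy, pvMinStep]
  | cons y ys =>
    simp only [PySem.List.insertBy, pvMinStep, List.head?]
    split_ifs with h <;> simp_all

theorem head_foldl_insertBy_rev {α : Type} (key : α → Int) (l : List α) (acc : List α) :
    (l.foldl (fun a x => PySem.List.insertBy (fun a b => decide (key b < key a)) x a) acc).head? =
    l.foldl (pvMaxStep key) acc.head? := by
  induction l generalizing acc with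
  | nil => rfl
  | cons x t ih => simp only [List.foldl]; rw [ih, head_insertBy_rev]

theorem head_foldl_insertBy_asc {α : Type} (key : α → Int) (l : List α) (acc : List α) :
    (l.foldl (fun a x => PySem.List.insertBy (fun a b => decide (key a < key b)) x a) acc).head? =
    l.foldl (pvMinStep key) acc.head? := by
  induction l generalizing acc with
  | nil => rfl
  | cons x t ih => simp only [List.foldl]; rw [ih, head_insertBy_asc]

theorem sorted_rev_head {α : Type} (key : α → Int) (l : List α) :
    (PySem.List.sorted l key true).head? = PySem.List.max? l key := by
  have := head_foldl_insertBy_rev key l []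
  simpa [PySem.List.sorted, PySem.List.max?, pvMaxStep] using this

theorem sorted_asc_head {α : Type} (key : α → Int) (l : List α) :
    (PySem.List.sorted l key false).head? = PySem.List.min? l key := by
  have := head_foldl_insertBy_asc key l []
  simpa [PySem.List.sorted, PySem.List.min?, pvMinStep] using this

-- B's (price, item)-pair accumulators against max?/min? on the plain items
def pvPairMaxStep {α : Type} (key : α → Int) (o : Option (Int × α)) (x : α) : Option (Int × α) :=
  if (match o with | none => true | some b => decide (b.1 < key x)) then some (key x, x) else o

def pvPairMinStep {α : Type} (key : α → Int) (o : Option (Int × α)) (x : α) : Option (Int × α) :=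
  if (match o with | none => true | some c => decide (key x < c.1)) then some (key x, x) else o

theorem foldl_pairMax {α : Type} (key : α → Int) (l : List α) (o : Option α) :
    l.foldl (pvPairMaxStep key) (o.map (fun m => (key m, m))) =
    (l.foldl (pvMaxStep key) o).map (fun m => (key m, m)) := by
  induction l generalizing o with
  | nil => rfl
  | cons x t ih =>
    simp only [List.foldl]
    rw [← ih]
    congr 1
    cases o with
    | none => simp [pvPairMaxStep, pvMaxStep]
    | some m =>
      simp only [pvPairMaxStep, pvMaxStep, Option.map]
      split_ifs with h <;> simp_all

theorem foldl_pairMin {α : Type} (key : α → Int) (l : List α) (o : Option α) :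
    l.foldl (pvPairMinStep key) (o.map (fun m => (key m, m))) =
    (l.foldl (pvMinStep key) o).map (fun m => (key m, m)) := by
  induction l generalizing o with
  | nil => rfl
  | cons x t ih =>
    simp only [List.foldl]
    rw [← ih]
    congr 1
    cases o with
    | none => simp [pvPairMinStep, pvMinStep]
    | some m =>
      simp only [pvPairMinStep, pvMinStep, Option.map]
      split_ifs with h <;> simp_all

-- B's single loop is the pair of folds over the two filtered lists A builds
theorem alt_fold_split (budget_limit : Int) (price_key : String)
    (l : List (List (String × Int)))
    (s : Option (Int × List (String × Int)) × Option (Int × List (String × Int))) :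
    l.foldl
      (fun (s : Option (Int × List (String × Int)) × Option (Int × List (String × Int))) item =>
        match (PySem.Dict.mk item).get? price_key with
        | none => s
        | some p =>
          let best := if decide (p ≤ budget_limit) && (match s.1 with | none => true | some b => decide (b.1 < p)) then some (p, item) else s.1
          let cheapest := if (match s.2 with | none => true | some c => decide (p < c.1)) then some (p, item) else s.2
          (best, cheapest)) s =
    (((l.filter (fun item => ((PySem.Dict.mk item).get? price_key).isSome)).filter
        (fun item => decide (((PySem.Dict.mk item).get? price_key).getD 0 ≤ budget_limit))).foldl
        (pvPairMaxStep (fun item => ((PySem.Dict.mk item).get? price_key).getD 0)) s.1,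
     (l.filter (fun item => ((PySem.Dict.mk item).get? price_key).isSome)).foldl
        (pvPairMinStep (fun item => ((PySem.Dict.mk item).get? price_key).getD 0)) s.2) := by
  induction l generalizing s with
  | nil => rfl
  | cons x t ih =>
    cases hx : (PySem.Dict.mk x).get? price_key with
    | none =>
      simp only [List.foldl_cons, hx, List.filter_cons]
      exact ih s
    | some p =>
      simp only [List.foldl_cons, hx, List.filter_cons]
      rw [ih]
      obtain ⟨s1, s2⟩ := s
      by_cases hb : p ≤ budget_limit
      all_goals
        simp only [Prod.mk.injEq]
        constructor
        · cases s1
          all_goals try simp [pvPairMaxStep, hx, hb, List.filter_filter]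
        · cases s2
          all_goals try simp [pvPairMinStep, hx]

theorem foldl_pairMax_none {α : Type} (key : α → Int) (l : List α) :
    l.foldl (pvPairMaxStep key) none = (l.foldl (pvMaxStep key) none).map (fun m => (key m, m)) := by
  simpa using foldl_pairMax key l none

theorem foldl_pairMin_none {α : Type} (key : α → Int) (l : List α) :
    l.foldl (pvPairMinStep key) none = (l.foldl (pvMinStep key) none).map (fun m => (key m, m)) := by
  simpa using foldl_pairMin key l none

-- B in closed form: first max over the in-budget items, else first min over the valid items
theorem alt_closed (items : List (List (String × Int))) (budget_limit : Int) (price_key : String) (id_key : String) :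
    select_best_within_budget_alt items budget_limit price_key id_key =
    (match ((items.filter (fun item => ((PySem.Dict.mk item).get? price_key).isSome)).filter
              (fun item => decide (((PySem.Dict.mk item).get? price_key).getD 0 ≤ budget_limit))).foldl
            (pvMaxStep (fun item => ((PySem.Dict.mk item).get? price_key).getD 0)) none with
     | some m => some m
     | none =>
       match (items.filter (fun item => ((PySem.Dict.mk item).get? price_key).isSome)).foldl
               (pvMinStep (fun item => ((PySem.Dict.mk item).get? price_key).getD 0)) none with
       | some c => some c
       | none => none) := by
  unfold select_best_within_budget_alt
  rw [alt_fold_split]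
  simp only [foldl_pairMax_none, foldl_pairMin_none]
  cases ((items.filter (fun item => ((PySem.Dict.mk item).get? price_key).isSome)).filter
      (fun item => decide (((PySem.Dict.mk item).get? price_key).getD 0 ≤ budget_limit))).foldl
      (pvMaxStep (fun item => ((PySem.Dict.mk item).get? price_key).getD 0)) none with
  | some m => simp
  | none =>
    cases (items.filter (fun item => ((PySem.Dict.mk item).get? price_key).isSome)).foldl
        (pvMinStep (fun item => ((PySem.Dict.mk item).get? price_key).getD 0)) none with
    | some c => simp
    | none => simp

theorem max?_eq_foldl {α : Type} (key : α → Int) (l : List α) :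
    PySem.List.max? l key = l.foldl (pvMaxStep key) none := rfl

theorem min?_eq_foldl {α : Type} (key : α → Int) (l : List α) :
    PySem.List.min? l key = l.foldl (pvMinStep key) none := rfl

-- ===== VERDICT (by name: the statement is the Claim_ definition above) =====
theorem select_best_within_budget_spec : Claim_equal_select_best_within_budget := by
  intro items budget_limit price_key id_key _hdom
  unfold Spec_select_best_within_budget
  rw [alt_closed]
  unfold select_best_within_budget
  by_cases h0 : items = []
  · subst h0; simp
  · rw [if_neg h0]
    by_cases h1 : items.filter (fun item => ((PySem.Dict.mk item).get? price_key).isSome) = []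
    · rw [if_pos h1, h1]
      simp
    · rw [if_neg h1]
      by_cases h2 : (items.filter (fun item => ((PySem.Dict.mk item).get? price_key).isSome)).filter
          (fun item => decide (((PySem.Dict.mk item).get? price_key).getD 0 ≤ budget_limit)) = []
      · rw [if_neg (by simpa using h2), sorted_asc_head, min?_eq_foldl, h2]
        cases (items.filter (fun item => ((PySem.Dict.mk item).get? price_key).isSome)).foldl
            (pvMinStep (fun item => ((PySem.Dict.mk item).get? price_key).getD 0)) none with
        | none => simp
        | some c => simp
      · rw [if_pos h2, sorted_rev_head, max?_eq_foldl]
        cases hm : ((items.filter (fun item => ((PySem.Dict.mk item).get? price_key).isSome)).filter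
            (fun item => decide (((PySem.Dict.mk item).get? price_key).getD 0 ≤ budget_limit))).foldl
            (pvMaxStep (fun item => ((PySem.Dict.mk item).get? price_key).getD 0)) none with
        | none =>
          exact absurd ((PySem.List.max?_eq_none_iff _ _).mp ((max?_eq_foldl _ _).trans hm)) h2
        | some m => simp
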